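-- pv_equiv track=rewrite | github.com/dvirsarig/Course-Projects | Projects/Python - BoggleGame/ex11_utils.py | get_score1
-- ===== SOURCE A (Python) =====
-- from typing import List, Tuple, Iterable, Optional
--
-- Board = List[List[str]]
--
-- DIRECTIONS = {(1, 0), (0, 1), (1, 1), (-1, 0), (0, -1), (-1, -1), (-1, 1), (1, -1)}
--
-- def coordinate_outside_of_board(row: int, col: int, board: Board) -> bool:
--     '''Return if row, col not in board borders'''
--     if (row < 0) or (row >= len(board)):
--         return True
--     if (col < 0) or (col >= len(board[0])):
--         return True
--     return False
--
-- def parts_of_string(s):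
--     '''Return the part of the string like this if s = 'DOG' : {'DOG', 'DO', 'D'}'''
--     parts = set()
--     for j in range(1, len(s) + 1):
--         parts.add(s[0:j])
--     return parts
--
-- def get_score1(board: Board, words: Iterable[str]) -> int:
--     '''Return max score for game mid-speed option'''
--     # Get all the parts of all words in one set
--     words = set(words)
--     partial_words = set()
--     for word in words:
--         for part in parts_of_string(word):
--             partial_words.add(part)
--     taken_words = set()
--     size = len(board) ** 2
--     score = 0
--
--     for n in range(size, 0, -1):
--         score += _get_score_in_n_size_at_board1(n, board, words, partial_words, taken_words)
--
--     return score
--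
-- def _get_score_in_n_size_at_board1(n: int, board: Board, words: set[str], partial_words: set[str],
--                                    taken_words: set[str]) -> int:
--     '''Helper function to get_score that return the score for n size paths'''
--     score = 0
--     # Run for any starting point in board
--     for start_row in range(len(board)):
--         for start_col in range(len(board[0])):
--             path_set = {(start_row, start_col)}  # Use this set to speed up the code
--             # For any starting point add all paths
--             score += _helper_get_score_in_n_size_at_board1(n - 1, board, path_set, start_row, start_col, partial_words,
--                                                            words,
--                                                            '', taken_words, 1)
--     return score
--
-- def _helper_get_score_in_n_size_at_board1(n: int, board: Board, path_set: set[Tuple[int, int]], row: int,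
--                                           col: int,
--                                           partial_words: set[str],
--                                           words: set[str], word: str,
--                                           taken_words: set[str], score: int) -> int:
--     '''An helper function that insert to moves_list all the valid path in starting location'''
--     if coordinate_outside_of_board(row, col, board):
--         return 0
--     word += board[row][col]  # update word
--     if n == 0:  # if we finish the path
--         if word not in taken_words:
--             if word in words:  # if final word in valid words
--                 taken_words.add(word)
--                 return score ** 2
--         return 0
--     if word not in partial_words:  # if word isn't possible to complete finish
--         return 0
--
--     score += 1
--     sum = 0
--     n -= 1  # counter
--     for direction in DIRECTIONS:  # check for any direction
--         # update coordinates
--         new_row = row + direction[0]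
--         new_col = col + direction[1]
--         coordinate = (new_row, new_col)
--
--         # Thw path can't repeat itself
--         if coordinate not in path_set:
--             coordinate = (new_row, new_col)
--             path_set.add(coordinate)
--
--             # Move in direction
--             sum += _helper_get_score_in_n_size_at_board1(n, board, path_set, new_row, new_col, partial_words, words,
--                                                          word,
--                                                          taken_words, score)
--
--             # reset for next direction
--             path_set.remove(coordinate)
--     return sum
-- ===== SOURCE B (Python) =====
-- def get_score1(board, words):
--     """Single depth-first search per start cell with prefix pruning; records each
--     word's maximum path length (capped at len(board)**2) and sums the squares."""
--     words = set(words)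
--     prefixes = set()
--     for w in words:
--         for j in range(1, len(w) + 1):
--             prefixes.add(w[:j])
--     rows = len(board)
--     cols = len(board[0]) if board else 0
--     cap = rows * rows
--     best = {}
--
--     def dfs(r, c, path, word, left):
--         word = word + board[r][c]
--         depth = cap - left
--         if word in words:
--             best[word] = max(depth, best.get(word, 0))
--         if left and word in prefixes:
--             for dr, dc in ((1, 0), (0, 1), (1, 1), (-1, 0), (0, -1), (-1, -1), (-1, 1), (1, -1)):
--                 nr, nc = r + dr, c + dc
--                 if 0 <= nr < rows and 0 <= nc < cols and (nr, nc) not in path: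
--                     dfs(nr, nc, path | {(nr, nc)}, word, left - 1)
--
--     for r in range(rows):
--         for c in range(cols):
--             dfs(r, c, {(r, c)}, '', cap - 1)
--     return sum(v * v for v in best.values())
-- ===== Notes on version B (the rewrite author's own statement) =====
-- stated objective: faster
-- what changed: A re-enumerates all simple paths once per exact path length n = size..1 with a 'taken' set; B runs a single depth-limited DFS from each start cell with the same prefix pruning, records each word's maximum path length in a dict, and returns the sum of squared maxima.
import Mathlib
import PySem

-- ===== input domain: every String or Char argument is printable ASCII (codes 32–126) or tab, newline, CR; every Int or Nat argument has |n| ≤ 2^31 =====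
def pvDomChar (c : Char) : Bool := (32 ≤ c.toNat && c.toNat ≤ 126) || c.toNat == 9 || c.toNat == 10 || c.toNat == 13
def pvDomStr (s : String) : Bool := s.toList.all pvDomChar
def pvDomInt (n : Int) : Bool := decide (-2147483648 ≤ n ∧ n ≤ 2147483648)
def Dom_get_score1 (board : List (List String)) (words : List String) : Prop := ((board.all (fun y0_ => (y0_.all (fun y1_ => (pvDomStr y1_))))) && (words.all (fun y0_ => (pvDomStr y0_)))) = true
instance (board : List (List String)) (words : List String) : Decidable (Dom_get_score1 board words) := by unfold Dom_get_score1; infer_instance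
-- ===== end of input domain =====

-- B changes the algorithm: one depth-limited DFS per start cell recording each word's
-- maximum path length, instead of A's separate exact-length enumeration for every n;
-- timing run reports B measurably faster. A mutates only its own local sets.

-- ===== PORT A =====

def pyDIRECTIONS : List (Int × Int) :=
  [(1, 0), (0, 1), (1, 1), (-1, 0), (0, -1), (-1, -1), (-1, 1), (1, -1)]
-- Python's DIRECTIONS is a set literal; its hash iteration order is not modelled, but the
-- helper's returned int is a sum over directions (order-independent), so the port
-- iterates the literal in source order.

def coordinate_outside_of_board (row col : Int) (board : List (List String)) : Bool :=
  if row < 0 ∨ PySem.List.len board ≤ row then true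
  else if col < 0 ∨ PySem.List.len (PySem.List.pyGetD board 0 ([] : List String)) ≤ col then true
  else false

def parts_of_string (s : String) : PySem.Set String :=
  (PySem.List.pyRange 1 (PySem.Str.len s + 1) 1).foldl
    (fun parts j => PySem.Set.add parts (PySem.Str.slice s (some 0) (some j))) PySem.Set.empty

-- taken_words is mutated in place in Python; the port threads it through and returns it.
def helper_get_score_in_n_size_at_board1 (n : Nat) (board : List (List String))
    (path_set : PySem.Set (Int × Int)) (row col : Int)
    (partial_words words : PySem.Set String) (word : String)
    (taken_words : PySem.Set String) (score : Int) : Int × PySem.Set String :=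
  if coordinate_outside_of_board row col board then (0, taken_words)
  else
    let word := word ++ PySem.List.pyGetD (PySem.List.pyGetD board row []) col ""
    match n with
    | 0 =>
        if PySem.Set.contains taken_words word then (0, taken_words)
        else if PySem.Set.contains words word then
          (score ^ 2, PySem.Set.add taken_words word)
        else (0, taken_words)
    | m + 1 =>
        if ¬ PySem.Set.contains partial_words word then (0, taken_words)
        else
          let score := score + 1
          pyDIRECTIONS.foldl (fun acc dir =>
            let new_row := row + dir.1
            let new_col := col + dir.2
            if PySem.Set.contains path_set (new_row, new_col) then acc
            else
              let r := helper_get_score_in_n_size_at_board1 m board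
                (PySem.Set.add path_set (new_row, new_col)) new_row new_col
                partial_words words word acc.2 score
              (acc.1 + r.1, r.2)) (0, taken_words)

-- n ranges over range(size, 0, -1), so n ≥ 1 at every call; the helper receives n - 1 ≥ 0.
def get_score_in_n_size_at_board1 (n : Nat) (board : List (List String))
    (words partial_words : PySem.Set String) (taken_words : PySem.Set String) :
    Int × PySem.Set String :=
  (List.range board.length).foldl (fun st (start_row : Nat) =>
    (List.range (PySem.List.pyGetD board 0 ([] : List String)).length).foldl
      (fun st (start_col : Nat) =>
        let path_set := PySem.Set.add PySem.Set.empty ((start_row : Int), (start_col : Int))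
        let r := helper_get_score_in_n_size_at_board1 (n - 1) board path_set
          (start_row : Int) (start_col : Int) partial_words words "" st.2 1
        (st.1 + r.1, r.2)) st) (0, taken_words)

-- for n in range(size, 0, -1):  the descending list [size, …, 1]
def pyDescend (k : Nat) : List Nat := ((List.range k).map (· + 1)).reverse

def get_score1 (board : List (List String)) (words : List String) : Int :=
  let wordsSet : PySem.Set String := PySem.Set.ofList words
  let partial_words : PySem.Set String :=
    wordsSet.foldl (fun pw word =>
      (parts_of_string word).foldl (fun pw part => PySem.Set.add pw part) pw) PySem.Set.empty
  let size := board.length ^ 2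
  ((pyDescend size).foldl (fun st n =>
    let r := get_score_in_n_size_at_board1 n board wordsSet partial_words st.2
    (st.1 + r.1, r.2)) (0, PySem.Set.empty)).1

-- ===== PORT B =====

def prefixesB (words : PySem.Set String) : PySem.Set String :=
  words.foldl (fun pre w =>
    (PySem.List.pyRange 1 (PySem.Str.len w + 1) 1).foldl
      (fun pre j => PySem.Set.add pre (PySem.Str.slice w none (some j))) pre) PySem.Set.empty

def dfsB (left : Nat) (rows cols : Int) (board : List (List String)) (cap : Nat)
    (wordsSet prefixes : PySem.Set String) (path : PySem.Set (Int × Int))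
    (r c : Int) (word : String) (best : PySem.Dict String Int) : PySem.Dict String Int :=
  let word := word ++ PySem.List.pyGetD (PySem.List.pyGetD board r []) c ""
  let depth : Int := (cap : Int) - (left : Int)
  let best :=
    if PySem.Set.contains wordsSet word then
      best.insert word (max depth (best.getD word 0))
    else best
  match left with
  | 0 => best
  | m + 1 =>
      if PySem.Set.contains prefixes word then
        [((1 : Int), (0 : Int)), (0, 1), (1, 1), (-1, 0), (0, -1), (-1, -1), (-1, 1),
            (1, -1)].foldl (fun b dir =>
          let nr := r + dir.1
          let nc := c + dir.2
          if 0 ≤ nr ∧ nr < rows ∧ 0 ≤ nc ∧ nc < cols ∧ ¬ PySem.Set.contains path (nr, nc) then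
            dfsB m rows cols board cap wordsSet prefixes
              (PySem.Set.add path (nr, nc)) nr nc word b
          else b) best
      else best

def get_score1_alt (board : List (List String)) (words : List String) : Int :=
  let wordsSet : PySem.Set String := PySem.Set.ofList words
  let prefixes := prefixesB wordsSet
  let rows := board.length
  let cols := (board.headD []).length
  let cap := rows * rows
  let best := (List.range rows).foldl (fun b (r : Nat) =>
    (List.range cols).foldl (fun b (c : Nat) =>
      dfsB (cap - 1) (rows : Int) (cols : Int) board cap wordsSet prefixes
        (PySem.Set.add PySem.Set.empty ((r : Int), (c : Int))) (r : Int) (c : Int) "" b) b)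
    PySem.Dict.empty
  ((PySem.Dict.values best).map (fun v => v * v)).sum

-- ===== PRECONDITION & SPEC =====
-- Pre_ excludes exactly the inputs where A raises IndexError: a board whose first row is
-- longer than some later row (the start loops index board[r][c] for every c < len(board[0])).
def Pre_get_score1 (board : List (List String)) (words : List String) : Prop :=
  ∀ row ∈ board, (board.headD []).length ≤ row.length
instance (board : List (List String)) (words : List String) : Decidable (Pre_get_score1 board words) := by
  unfold Pre_get_score1; infer_instance

def pvWitness_get_score1 : List (List String) × List String := ([["a", "b"], ["c", "a"]], ["ab", "a", "zz"])

def Spec_get_score1 (board : List (List String)) (words : List String) (out : Int) : Prop := out = get_score1_alt board words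
instance (board : List (List String)) (words : List String) (out : Int) : Decidable (Spec_get_score1 board words out) := by unfold Spec_get_score1; infer_instance

-- ===== CLAIM (what is proved, stated in full; the proofs are below) =====
def Claim_equal_get_score1 : Prop := ∀ (board : List (List String)) (words : List String), Dom_get_score1 board words → Pre_get_score1 board words → Spec_get_score1 board words (get_score1 board words)


-- ===== LEMMAS AND PROOFS =====

-- Both ports index cells the same way; abbreviation used by the proof-side generator.
def cellAt (board : List (List String)) (r c : Int) : String :=
  PySem.List.pyGetD (PySem.List.pyGetD board r []) c ""

lemma pyGetD_zero_headD (board : List (List String)) :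
    PySem.List.pyGetD board 0 ([] : List String) = board.headD [] := by
  rw [PySem.List.pyGetD_zero]; cases board <;> simp

lemma outside_false_iff (r c : Int) (board : List (List String)) :
    coordinate_outside_of_board r c board = false ↔
      0 ≤ r ∧ r < (board.length : Int) ∧ 0 ≤ c ∧ c < ((board.headD []).length : Int) := by
  unfold coordinate_outside_of_board
  rw [pyGetD_zero_headD]
  split_ifs with h1 h2 <;> simp [PySem.List.len_eq] at * <;> omega

-- The completion generator: all (word, depth) pairs found by the pruned DFS with the
-- given fuel, in traversal order.  Both ports' searches are instances of it.
def gen (board : List (List String)) (pw ws : PySem.Set String) :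
    Nat → PySem.Set (Int × Int) → Int → Int → String → Nat → List (String × Nat)
  | 0, _, r, c, word, d =>
      if coordinate_outside_of_board r c board then []
      else if PySem.Set.contains ws (word ++ cellAt board r c) then
        [(word ++ cellAt board r c, d)]
      else []
  | m + 1, path, r, c, word, d =>
      if coordinate_outside_of_board r c board then []
      else
        let w := word ++ cellAt board r c
        let here := if PySem.Set.contains ws w then [(w, d)] else []
        if PySem.Set.contains pw w then
          here ++ pyDIRECTIONS.flatMap (fun dir =>
            if PySem.Set.contains path (r + dir.1, c + dir.2) then []
            else gen board pw ws m (PySem.Set.add path (r + dir.1, c + dir.2))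
              (r + dir.1) (c + dir.2) w (d + 1))
        else here

lemma gen_outside (board : List (List String)) (pw ws : PySem.Set String)
    (fuel : Nat) (path : PySem.Set (Int × Int)) (r c : Int) (word : String) (d : Nat)
    (h : coordinate_outside_of_board r c board = true) :
    gen board pw ws fuel path r c word d = [] := by
  cases fuel <;> simp [gen, h]

-- A's "if word not yet taken, add score and take it" loop over a list of words.
def dsum (v : Int) (L : List String) (st : Int × PySem.Set String) : Int × PySem.Set String :=
  L.foldl (fun st w =>
    if PySem.Set.contains st.2 w then st else (st.1 + v, PySem.Set.add st.2 w)) st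

lemma dsum_cons (v : Int) (w : String) (L : List String) (s : Int) (t : PySem.Set String) :
    dsum v (w :: L) (s, t)
      = dsum v L (if PySem.Set.contains t w then (s, t) else (s + v, PySem.Set.add t w)) := by
  simp only [dsum, List.foldl_cons]

lemma dsum_shift (v : Int) (L : List String) (s : Int) (t : PySem.Set String) :
    dsum v L (s, t) = (s + (dsum v L (0, t)).1, (dsum v L (0, t)).2) := by
  induction L generalizing s t with
  | nil => simp [dsum]
  | cons w L ih =>
      by_cases hc : PySem.Set.contains t w = true
      · simp only [dsum_cons, hc, if_true]
        exact ih s t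
      · simp only [dsum_cons, hc, Bool.false_eq_true, if_false]
        rw [ih (s + v), ih (0 + v)]
        have : s + (0 + v + (dsum v L (0, PySem.Set.add t w)).1)
            = s + v + (dsum v L (0, PySem.Set.add t w)).1 := by ring
        rw [this]

lemma thread_dsum {α : Type} (step : Int × PySem.Set String → α → Int × PySem.Set String)
    (Lf : α → List String) (v : Int) :
    ∀ (xs : List α), (∀ x ∈ xs, ∀ s t, step (s, t) x =
        (s + (dsum v (Lf x) (0, t)).1, (dsum v (Lf x) (0, t)).2)) →
      ∀ s t, xs.foldl step (s, t) = dsum v (xs.flatMap Lf) (s, t) := by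
  intro xs
  induction xs with
  | nil => intro _ s t; simp [dsum]
  | cons x xs ih =>
      intro h s t
      simp only [List.foldl_cons, List.flatMap_cons]
      rw [h x (by simp)]
      rw [ih (fun y hy => h y (by simp [hy]))]
      simp only [dsum, List.foldl_append]
      have := dsum_shift v (Lf x) s t
      simp only [dsum] at this
      rw [this]

lemma dsum_spec (v : Int) :
    ∀ (L : List String) (s : Int) (t : PySem.Set String), t.Nodup →
      ∃ Δ : List String,
        dsum v L (s, t) = (s + v * Δ.length, t ++ Δ) ∧ Δ.Nodup ∧
        (∀ w ∈ Δ, w ∈ L ∧ w ∉ t) ∧ (∀ w, w ∈ L → w ∉ t → w ∈ Δ) := by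
  intro L
  induction L with
  | nil => intro s t ht; exact ⟨[], by simp [dsum], by simp, by simp, by simp⟩
  | cons w L ih =>
      intro s t ht
      by_cases hc : PySem.Set.contains t w = true
      · have hw : w ∈ t := by simpa using hc
        obtain ⟨Δ, h1, h2, h3, h4⟩ := ih s t ht
        refine ⟨Δ, ?_, h2, ?_, ?_⟩
        · rw [dsum_cons, if_pos hc]; exact h1
        · exact fun x hx => ⟨List.mem_cons_of_mem _ (h3 x hx).1, (h3 x hx).2⟩
        · intro x hx hxt
          rcases List.mem_cons.mp hx with rfl | hx
          · exact absurd hw hxt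
          · exact h4 x hx hxt
      · have hw : w ∉ t := by simpa using hc
        have hadd : PySem.Set.add t w = t ++ [w] := PySem.Set.add_of_not_mem hw
        have ht' : (t ++ [w]).Nodup := by
          simp only [List.nodup_append, List.nodup_singleton, true_and, ht]
          intro a ha b hb
          rw [List.mem_singleton] at hb
          exact fun he => hw ((hb ▸ he) ▸ ha)
        obtain ⟨Δ, h1, h2, h3, h4⟩ := ih (s + v) (t ++ [w]) ht'
        refine ⟨w :: Δ, ?_, ?_, ?_, ?_⟩
        · rw [dsum_cons, if_neg (by simpa using hw), hadd, h1]
          refine Prod.ext ?_ ?_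
          · simp; ring
          · simp
        · refine List.nodup_cons.mpr ⟨?_, h2⟩
          intro hwΔ
          exact (h3 w hwΔ).2 (by simp)
        · intro x hx
          rcases List.mem_cons.mp hx with rfl | hx
          · exact ⟨by simp, hw⟩
          · refine ⟨List.mem_cons_of_mem _ (h3 x hx).1, fun hxt => (h3 x hx).2 (by simp [hxt])⟩
        · intro x hx hxt
          rcases List.mem_cons.mp hx with rfl | hx
          · simp
          · by_cases hxw : x = w
            · simp [hxw]
            · exact List.mem_cons_of_mem _ (h4 x hx (by simp [hxt, hxw]))

-- A's helper with exact remaining length n collects precisely the depth (d + n) layer of gen.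
lemma helperA_eq_dsum (board : List (List String)) (pw ws : PySem.Set String) :
    ∀ (n : Nat) (path : PySem.Set (Int × Int)) (r c : Int) (word : String)
      (taken : PySem.Set String) (score : Int) (d : Nat),
      helper_get_score_in_n_size_at_board1 n board path r c pw ws word taken score
        = dsum ((score + (n : Int)) ^ 2)
            (((gen board pw ws n path r c word d).filter (fun p => p.2 == d + n)).map Prod.fst)
            (0, taken) := by
  intro n
  induction n with
  | zero =>
      intro path r c word taken score d
      rw [helper_get_score_in_n_size_at_board1]
      by_cases ho : coordinate_outside_of_board r c board = true
      · rw [if_pos ho, gen_outside board pw ws _ _ _ _ _ _ ho]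
        rfl
      · rw [if_neg ho]
        simp only [gen, if_neg ho, cellAt]
        by_cases hws : (word ++ PySem.List.pyGetD (PySem.List.pyGetD board r []) c "") ∈ ws
        · by_cases ht : (word ++ PySem.List.pyGetD (PySem.List.pyGetD board r []) c "") ∈ taken
          · simp [hws, ht, dsum]
          · simp [hws, ht, dsum]
        · by_cases ht : (word ++ PySem.List.pyGetD (PySem.List.pyGetD board r []) c "") ∈ taken
          · simp [hws, ht, dsum]
          · simp [hws, ht, dsum]
  | succ m ih =>
      intro path r c word taken score d
      rw [helper_get_score_in_n_size_at_board1]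
      by_cases ho : coordinate_outside_of_board r c board = true
      · rw [if_pos ho, gen_outside board pw ws _ _ _ _ _ _ ho]
        rfl
      · rw [if_neg ho]
        simp only [gen, if_neg ho, cellAt]
        set w' := word ++ PySem.List.pyGetD (PySem.List.pyGetD board r []) c "" with hw'
        have hhere : ∀ (b : Bool), ((if b = true then [(w', d)] else []).filter
            (fun p => p.2 == d + (m + 1))) = [] := by
          intro b
          split
          · simp only [List.filter_cons]
            rw [if_neg (by simp)]
            rfl
          · rfl
        by_cases hpw : PySem.Set.contains pw w' = true
        · rw [if_neg (not_not_intro hpw), if_pos hpw]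
          have hthread := thread_dsum
            (fun acc dir =>
              let new_row := r + dir.1
              let new_col := c + dir.2
              if PySem.Set.contains path (new_row, new_col) then acc
              else
                let rr := helper_get_score_in_n_size_at_board1 m board
                  (PySem.Set.add path (new_row, new_col)) new_row new_col
                  pw ws w' acc.2 (score + 1)
                (acc.1 + rr.1, rr.2))
            (fun dir =>
              if PySem.Set.contains path (r + dir.1, c + dir.2) then []
              else ((gen board pw ws m (PySem.Set.add path (r + dir.1, c + dir.2))
                  (r + dir.1) (c + dir.2) w' (d + 1)).filter
                    (fun p => p.2 == d + (m + 1))).map Prod.fst)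
            ((score + ((m + 1 : Nat) : Int)) ^ 2)
            pyDIRECTIONS ?_ 0 taken
          · rw [hthread]
            congr 1
            simp only [List.filter_append, List.map_append, List.filter_flatMap,
              List.map_flatMap, hhere, List.map_nil, List.nil_append]
            congr 1
            funext dir
            by_cases hc : PySem.Set.contains path (r + dir.1, c + dir.2) = true
            · rw [if_pos hc, if_pos hc]
              rfl
            · rw [if_neg hc, if_neg hc]
          · intro dir _ s t
            by_cases hc : PySem.Set.contains path (r + dir.1, c + dir.2) = true
            · simp only [if_pos hc]
              simp [dsum]
            · simp only [if_neg hc]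
              have hihd := ih (PySem.Set.add path (r + dir.1, c + dir.2))
                (r + dir.1) (c + dir.2) w' t (score + 1) (d + 1)
              have hv : ((score + 1) + ((m : Nat) : Int)) ^ 2
                  = (score + ((m + 1 : Nat) : Int)) ^ 2 := by push_cast; ring
              have hp : d + 1 + m = d + (m + 1) := by omega
              rw [hv, hp] at hihd
              rw [hihd]
        · rw [if_pos hpw, if_neg hpw, hhere]
          rfl

lemma gen_congr_pw (board : List (List String)) (pwA pwB ws : PySem.Set String)
    (hpw : ∀ x, PySem.Set.contains pwA x = PySem.Set.contains pwB x) :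
    ∀ (fuel : Nat) (path : PySem.Set (Int × Int)) (r c : Int) (word : String) (d : Nat),
      gen board pwA ws fuel path r c word d = gen board pwB ws fuel path r c word d := by
  intro fuel
  induction fuel with
  | zero => intro path r c word d; simp [gen]
  | succ m ih =>
      intro path r c word d
      simp only [gen]
      split
      · rfl
      · rw [hpw]
        split
        · congr 1
          congr 1
          funext dir
          split
          · rfl
          · exact ih _ _ _ _ _
        · rfl

lemma gen_bound (board : List (List String)) (pw ws : PySem.Set String) :
    ∀ (fuel : Nat) (path : PySem.Set (Int × Int)) (r c : Int) (word : String) (d : Nat)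
      (w : String) (dd : Nat), (w, dd) ∈ gen board pw ws fuel path r c word d →
      d ≤ dd ∧ dd ≤ d + fuel := by
  intro fuel
  induction fuel with
  | zero =>
      intro path r c word d w dd h
      simp only [gen] at h
      split at h
      · simp at h
      · split at h <;> simp at h <;> omega
  | succ m ih =>
      intro path r c word d w dd h
      simp only [gen] at h
      split at h
      · simp at h
      · have hhere : ∀ (x : String × Nat),
            (x ∈ (if PySem.Set.contains ws (word ++ cellAt board r c) then
              [(word ++ cellAt board r c, d)] else [])) → x.2 = d := by
          intro x hx
          split at hx <;> simp at hx
          rw [hx]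
        split at h
        · rcases List.mem_append.mp h with h1 | h1
          · have := hhere _ h1
            simp at this
            omega
          · rcases List.mem_flatMap.mp h1 with ⟨dir, _, h2⟩
            split at h2
            · simp at h2
            · have := ih _ _ _ _ _ _ _ h2
              omega
        · have := hhere _ h
          simp at this
          omega

lemma gen_mono (board : List (List String)) (pw ws : PySem.Set String) (j : Nat) :
    ∀ (fuel : Nat) (path : PySem.Set (Int × Int)) (r c : Int) (word : String) (d : Nat)
      (w : String) (dd : Nat), (w, dd) ∈ gen board pw ws fuel path r c word d →
      (w, dd) ∈ gen board pw ws (fuel + j) path r c word d := by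
  intro fuel
  induction fuel with
  | zero =>
      intro path r c word d w dd h
      simp only [gen] at h
      split at h
      · simp at h
      · cases j with
        | zero => simpa [gen, *] using h
        | succ j' =>
            split at h
            · simp at h
              simp only [Nat.zero_add, gen]
              split
              · simp_all
              · split
                · refine List.mem_append_left _ ?_
                  simp [h, *]
                · simp [h, *]
            · simp at h
  | succ m ih =>
      intro path r c word d w dd h
      simp only [gen] at h
      split at h
      · simp at h
      · have : m + 1 + j = (m + j) + 1 := by omega
        rw [this]
        simp only [gen]
        split
        · simp_all
        · split at h
          · rcases List.mem_append.mp h with h1 | h1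
            · split
              · exact List.mem_append_left _ h1
              · simp_all
            · rcases List.mem_flatMap.mp h1 with ⟨dir, hdir, h2⟩
              split at h2
              · simp at h2
              · split
                · refine List.mem_append_right _ ?_
                  refine List.mem_flatMap.mpr ⟨dir, hdir, ?_⟩
                  rw [if_neg (by assumption)]
                  exact ih _ _ _ _ _ _ _ h2
                · simp_all
          · split
            · exact List.mem_append_left _ h
            · exact h
lemma gen_anti (board : List (List String)) (pw ws : PySem.Set String) (j : Nat) :
    ∀ (fuel : Nat) (path : PySem.Set (Int × Int)) (r c : Int) (word : String) (d : Nat)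
      (w : String) (dd : Nat), dd ≤ d + fuel →
      (w, dd) ∈ gen board pw ws (fuel + j) path r c word d →
      (w, dd) ∈ gen board pw ws fuel path r c word d := by
  intro fuel
  induction fuel with
  | zero =>
      intro path r c word d w dd hdd h
      cases j with
      | zero => exact h
      | succ j' =>
          simp only [Nat.zero_add, gen] at h
          simp only [gen]
          split at h
          · simp at h
          · rw [if_neg (by assumption)]
            split at h
            · rcases List.mem_append.mp h with h1 | h1
              · split at h1 <;> simp_all
              · rcases List.mem_flatMap.mp h1 with ⟨dir, hdir, h2⟩
                split at h2
                · simp at h2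
                · have := gen_bound board pw ws _ _ _ _ _ _ _ _ h2
                  omega
            · split at h <;> simp_all
  | succ m ih =>
      intro path r c word d w dd hdd h
      have hj : m + 1 + j = (m + j) + 1 := by omega
      rw [hj] at h
      simp only [gen] at h ⊢
      split at h
      · simp at h
      · rw [if_neg (by assumption)]
        split at h
        · rcases List.mem_append.mp h with h1 | h1
          · split
            · exact List.mem_append_left _ h1
            · simp_all
          · rcases List.mem_flatMap.mp h1 with ⟨dir, hdir, h2⟩
            split at h2
            · simp at h2
            · by_cases hddd : dd ≤ d + 1 + m
              · split
                · refine List.mem_append_right _ ?_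
                  refine List.mem_flatMap.mpr ⟨dir, hdir, ?_⟩
                  rw [if_neg (by assumption)]
                  exact ih _ _ _ _ _ _ _ hddd h2
                · simp_all
              · have := gen_bound board pw ws _ _ _ _ _ _ _ _ h2
                omega
        · split
          · exact List.mem_append_left _ h
          · exact h

lemma gen_fuel_iff (board : List (List String)) (pw ws : PySem.Set String)
    (fuel fuel' : Nat) (path : PySem.Set (Int × Int)) (r c : Int) (word : String) (d : Nat)
    (w : String) (dd : Nat) (h1 : dd ≤ d + fuel) (h2 : fuel ≤ fuel') :
    (w, dd) ∈ gen board pw ws fuel path r c word d ↔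
    (w, dd) ∈ gen board pw ws fuel' path r c word d := by
  have hj : fuel' = fuel + (fuel' - fuel) := by omega
  rw [hj]
  exact ⟨gen_mono board pw ws (fuel' - fuel) fuel path r c word d w dd,
         gen_anti board pw ws (fuel' - fuel) fuel path r c word d w dd h1⟩

-- B's dictionary update, one completion at a time.
def updB (b : PySem.Dict String Int) (p : String × Nat) : PySem.Dict String Int :=
  b.insert p.1 (max ((p.2 : Int)) (b.getD p.1 0))

lemma thread_updB {α : Type} (step : PySem.Dict String Int → α → PySem.Dict String Int)
    (Lf : α → List (String × Nat)) :
    ∀ (xs : List α), (∀ x ∈ xs, ∀ b, step b x = (Lf x).foldl updB b) →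
      ∀ b, xs.foldl step b = (xs.flatMap Lf).foldl updB b := by
  intro xs
  induction xs with
  | nil => intro _ b; rfl
  | cons x xs ih =>
      intro h b
      simp only [List.foldl_cons, List.flatMap_cons, List.foldl_append]
      rw [h x (by simp), ih (fun y hy => h y (by simp [hy]))]

lemma dfsB_eq_foldl (board : List (List String)) (ws pw : PySem.Set String) (cap : Nat) :
    ∀ (left : Nat) (path : PySem.Set (Int × Int)) (r c : Int) (word : String)
      (best : PySem.Dict String Int), left ≤ cap →
      coordinate_outside_of_board r c board = false →
      dfsB left (board.length : Int) ((board.headD []).length : Int) board cap ws pw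
          path r c word best
        = (gen board pw ws left path r c word (cap - left)).foldl updB best := by
  intro left
  induction left with
  | zero =>
      intro path r c word best hle hout
      rw [dfsB]
      simp only [gen, hout, Bool.false_eq_true, if_false, Nat.sub_zero, cellAt]
      by_cases hws : (word ++ PySem.List.pyGetD (PySem.List.pyGetD board r []) c "") ∈ ws
      · simp [hws, updB]
      · simp [hws]
  | succ m ih =>
      intro path r c word best hle hout
      rw [dfsB]
      simp only [gen, hout, Bool.false_eq_true, if_false, cellAt]
      set w' := word ++ PySem.List.pyGetD (PySem.List.pyGetD board r []) c "" with hw'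
      have hdep : ((cap : Int) - ((m + 1 : Nat) : Int))
          = (((cap - (m + 1) : Nat)) : Int) := by
        push_cast [Nat.cast_sub hle]
        ring
      have hbest : (if PySem.Set.contains ws w' = true then
            best.insert w' (max ((cap : Int) - ((m + 1 : Nat) : Int)) (best.getD w' 0))
          else best)
          = (if PySem.Set.contains ws w' = true then [(w', cap - (m + 1))] else []).foldl
              updB best := by
        split
        · simp only [List.foldl_cons, List.foldl_nil, updB, hdep]
        · rfl
      by_cases hpw : PySem.Set.contains pw w' = true
      · rw [if_pos hpw, if_pos hpw]
        rw [List.foldl_append, ← hbest]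
        set best' := (if PySem.Set.contains ws w' = true then
            best.insert w' (max ((cap : Int) - ((m + 1 : Nat) : Int)) (best.getD w' 0))
          else best) with hbest'
        have hcm : cap - (m + 1) + 1 = cap - m := by omega
        rw [show ([((1 : Int), (0 : Int)), (0, 1), (1, 1), (-1, 0), (0, -1), (-1, -1), (-1, 1),
          (1, -1)] : List (Int × Int)) = pyDIRECTIONS from rfl]
        refine thread_updB _
          (fun dir =>
            if PySem.Set.contains path (r + dir.1, c + dir.2) then []
            else gen board pw ws m (PySem.Set.add path (r + dir.1, c + dir.2))
              (r + dir.1) (c + dir.2) w' (cap - (m + 1) + 1))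
          pyDIRECTIONS ?_ best'
        intro dir _ b
        dsimp only
        by_cases hc : PySem.Set.contains path (r + dir.1, c + dir.2) = true
        · rw [if_pos hc]
          have : (0 ≤ r + dir.1 ∧ r + dir.1 < (board.length : Int) ∧ 0 ≤ c + dir.2 ∧
              c + dir.2 < (((board.headD []).length : Nat) : Int) ∧
              ¬ PySem.Set.contains path (r + dir.1, c + dir.2) = true) → False := by
            intro hh
            exact hh.2.2.2.2 hc
          rw [if_neg this]
          rfl
        · by_cases hb : 0 ≤ r + dir.1 ∧ r + dir.1 < (board.length : Int) ∧
              0 ≤ c + dir.2 ∧ c + dir.2 < (((board.headD []).length : Nat) : Int)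
          · rw [if_neg hc, if_pos ⟨hb.1, hb.2.1, hb.2.2.1, hb.2.2.2, hc⟩]
            rw [hcm]
            exact ih _ _ _ _ b (by omega)
              ((outside_false_iff _ _ board).mpr ⟨hb.1, hb.2.1, hb.2.2.1, hb.2.2.2⟩)
          · have hob : coordinate_outside_of_board (r + dir.1) (c + dir.2) board = true := by
              rcases Bool.eq_false_or_eq_true
                  (coordinate_outside_of_board (r + dir.1) (c + dir.2) board) with ht | hf
              · exact ht
              · exact absurd ((outside_false_iff _ _ board).mp hf) hb
            rw [if_neg hc, gen_outside board pw ws _ _ _ _ _ _ hob]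
            rw [if_neg (by
              intro hh
              exact hb ⟨hh.1, hh.2.1, hh.2.2.1, hh.2.2.2.1⟩)]
            rfl
      · rw [if_neg hpw, if_neg hpw]
        exact hbest

-- The word list A collects at level n (n ≥ 1), and the full completion list C.
def LA (board : List (List String)) (pw ws : PySem.Set String) (n : Nat) : List String :=
  (List.range board.length).flatMap (fun (r : Nat) =>
    (List.range (board.headD []).length).flatMap (fun (c : Nat) =>
      ((gen board pw ws (n - 1) (PySem.Set.add PySem.Set.empty ((r : Int), (c : Int)))
          (r : Int) (c : Int) "" 1).filter (fun p => p.2 == n)).map Prod.fst))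

def CC (board : List (List String)) (pw ws : PySem.Set String) : List (String × Nat) :=
  (List.range board.length).flatMap (fun (r : Nat) =>
    (List.range (board.headD []).length).flatMap (fun (c : Nat) =>
      gen board pw ws (board.length * board.length - 1)
        (PySem.Set.add PySem.Set.empty ((r : Int), (c : Int))) (r : Int) (c : Int) "" 1))

lemma levelA_eq_dsum (board : List (List String)) (pw ws : PySem.Set String)
    (n : Nat) (hn : 1 ≤ n) (t : PySem.Set String) :
    get_score_in_n_size_at_board1 n board ws pw t
      = dsum ((n : Int) ^ 2) (LA board pw ws n) (0, t) := by
  have hv : ((1 : Int) + (((n - 1 : Nat)) : Int)) ^ 2 = ((n : Int)) ^ 2 := by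
    push_cast [Nat.cast_sub hn]
    ring
  have h1 : 1 + (n - 1) = n := by omega
  rw [get_score_in_n_size_at_board1]
  simp only [pyGetD_zero_headD]
  rw [LA]
  refine thread_dsum _
    (fun (r : Nat) => (List.range (board.headD []).length).flatMap (fun (c : Nat) =>
      ((gen board pw ws (n - 1) (PySem.Set.add PySem.Set.empty ((r : Int), (c : Int)))
          (r : Int) (c : Int) "" 1).filter (fun p => p.2 == n)).map Prod.fst))
    ((n : Int) ^ 2) (List.range board.length) ?_ 0 t
  intro r _ s t'
  have hin := thread_dsum
    (fun st start_col =>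
      let path_set := PySem.Set.add PySem.Set.empty ((r : Int), ((start_col : Nat) : Int))
      let rr := helper_get_score_in_n_size_at_board1 (n - 1) board path_set (r : Int)
        ((start_col : Nat) : Int) pw ws "" st.2 1
      (st.1 + rr.1, rr.2))
    (fun (c : Nat) => ((gen board pw ws (n - 1) (PySem.Set.add PySem.Set.empty ((r : Int), (c : Int)))
        (r : Int) (c : Int) "" 1).filter (fun p => p.2 == n)).map Prod.fst)
    ((n : Int) ^ 2) (List.range (board.headD []).length) ?_ s t'
  · rw [hin, dsum_shift]
  · intro c _ s' t''
    dsimp only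
    have hh := helperA_eq_dsum board pw ws (n - 1)
      (PySem.Set.add PySem.Set.empty ((r : Int), (c : Int))) (r : Int) (c : Int) "" t'' 1 1
    rw [hv, h1] at hh
    rw [hh]

lemma altB_eq (board : List (List String)) (words : List String) :
    get_score1_alt board words
      = ((PySem.Dict.values ((CC board (prefixesB (PySem.Set.ofList words))
            (PySem.Set.ofList words)).foldl updB PySem.Dict.empty)).map (fun v => v * v)).sum := by
  rw [get_score1_alt]
  have hd : (List.range board.length).foldl (fun b (r : Nat) =>
      (List.range (board.headD []).length).foldl (fun b (c : Nat) =>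
        dfsB (board.length * board.length - 1) ((board.length : Nat) : Int)
          (((board.headD []).length : Nat) : Int) board (board.length * board.length)
          (PySem.Set.ofList words) (prefixesB (PySem.Set.ofList words))
          (PySem.Set.add PySem.Set.empty ((r : Int), (c : Int))) (r : Int) (c : Int) "" b) b)
      PySem.Dict.empty
      = (CC board (prefixesB (PySem.Set.ofList words)) (PySem.Set.ofList words)).foldl updB
          PySem.Dict.empty := by
    rw [CC]
    refine thread_updB _
      (fun (r : Nat) => (List.range (board.headD []).length).flatMap (fun (c : Nat) =>
        gen board (prefixesB (PySem.Set.ofList words)) (PySem.Set.ofList words)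
          (board.length * board.length - 1)
          (PySem.Set.add PySem.Set.empty ((r : Int), (c : Int))) (r : Int) (c : Int) "" 1))
      (List.range board.length) ?_ PySem.Dict.empty
    intro r hr b
    have hrows : 1 ≤ board.length := by
      rcases List.mem_range.mp hr with _
      omega
    refine thread_updB _
      (fun (c : Nat) => gen board (prefixesB (PySem.Set.ofList words)) (PySem.Set.ofList words)
          (board.length * board.length - 1)
          (PySem.Set.add PySem.Set.empty ((r : Int), (c : Int))) (r : Int) (c : Int) "" 1)
      (List.range (board.headD []).length) ?_ b
    intro c hc b'
    have h1 : board.length * board.length - (board.length * board.length - 1) = 1 := by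
      have : 1 ≤ board.length * board.length := Nat.one_le_iff_ne_zero.mpr (by positivity)
      omega
    rw [dfsB_eq_foldl board (PySem.Set.ofList words) (prefixesB (PySem.Set.ofList words))
      (board.length * board.length) (board.length * board.length - 1)
      (PySem.Set.add PySem.Set.empty ((r : Int), (c : Int))) (r : Int) (c : Int) "" b'
      (by omega)
      ((outside_false_iff _ _ board).mpr
        ⟨by positivity, by exact_mod_cast List.mem_range.mp hr,
         by positivity, by exact_mod_cast List.mem_range.mp hc⟩), h1]
  rw [hd]

-- maximum recorded depth of a word in a completion list
def mxC (C : List (String × Nat)) (w : String) : Nat :=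
  C.foldl (fun a p => if p.1 = w then max a p.2 else a) 0

lemma mx_le (w : String) (k : Nat) :
    ∀ (C : List (String × Nat)) (a : Nat), (∀ dd, (w, dd) ∈ C → dd ≤ k) → a ≤ k →
      C.foldl (fun a p => if p.1 = w then max a p.2 else a) a ≤ k := by
  intro C
  induction C with
  | nil => intro a _ ha; simpa using ha
  | cons p C ih =>
      intro a h ha
      simp only [List.foldl_cons]
      split_ifs with hp
      · exact ih _ (fun dd hdd => h dd (List.mem_cons_of_mem _ hdd))
          (by
            have : p.2 ≤ k := h p.2 (by rw [← hp]; exact List.mem_cons_self)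
            omega)
      · exact ih _ (fun dd hdd => h dd (List.mem_cons_of_mem _ hdd)) ha

lemma le_foldl_init (w : String) :
    ∀ (C : List (String × Nat)) (a : Nat),
      a ≤ C.foldl (fun a p => if p.1 = w then max a p.2 else a) a := by
  intro C
  induction C with
  | nil => intro a; simp
  | cons p C ih =>
      intro a
      simp only [List.foldl_cons]
      split_ifs with hp
      · exact le_trans (Nat.le_max_left _ _) (ih _)
      · exact ih a

lemma le_mx (w : String) (dd : Nat) :
    ∀ (C : List (String × Nat)) (a : Nat), (w, dd) ∈ C →
      dd ≤ C.foldl (fun a p => if p.1 = w then max a p.2 else a) a := by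
  intro C
  induction C with
  | nil => intro a h; simp at h
  | cons p C ih =>
      intro a h
      rcases List.mem_cons.mp h with heq | hmem
      · simp only [List.foldl_cons]
        rw [← heq]
        rw [if_pos (rfl : ((w, dd).1 = w))]
        exact le_trans (Nat.le_max_right _ _) (le_foldl_init w C _)
      · simp only [List.foldl_cons]
        exact ih _ hmem

lemma foldl_max_cast (w : String) :
    ∀ (C : List (String × Nat)) (a : Nat),
      C.foldl (fun a p => if p.1 = w then max a ((p.2 : Int)) else a) ((a : Nat) : Int)
        = ((C.foldl (fun a p => if p.1 = w then max a p.2 else a) a : Nat) : Int) := by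
  intro C
  induction C with
  | nil => intro a; rfl
  | cons p C ih =>
      intro a
      simp only [List.foldl_cons]
      split_ifs with hp
      · rw [show (max ((a : Nat) : Int) ((p.2 : Nat) : Int)) = (((max a p.2 : Nat) : Int)) by
          simp [Nat.cast_max]]
        exact ih _
      · exact ih a

lemma getD_foldl_updB (w : String) :
    ∀ (C : List (String × Nat)) (b : PySem.Dict String Int),
      (C.foldl updB b).getD w 0
        = C.foldl (fun a p => if p.1 = w then max a ((p.2 : Int)) else a) (b.getD w 0) := by
  intro C
  induction C with
  | nil => intro b; rfl
  | cons p C ih =>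
      intro b
      simp only [List.foldl_cons]
      rw [ih]
      congr 1
      simp only [updB]
      rw [PySem.Dict.getD_insert]
      split_ifs with h1 h2 h3
      · rw [h1]; exact max_comm _ _
      · exact absurd h1.symm h2
      · exact absurd h3.symm h1
      · rfl

-- membership of the nested preprocessing folds
lemma mem_nested_add {κ : Type} (f : String → κ → String) (g : String → List κ) :
    ∀ (wsl : List String) (init : PySem.Set String) (x : String),
      (x ∈ wsl.foldl (fun pre w => (g w).foldl (fun pre j => PySem.Set.add pre (f w j)) pre) init)
        ↔ x ∈ init ∨ ∃ w ∈ wsl, ∃ j ∈ g w, x = f w j := by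
  intro wsl
  induction wsl with
  | nil => intro init x; simp
  | cons w wsl ih =>
      intro init x
      simp only [List.foldl_cons]
      rw [ih]
      rw [PySem.Set.mem_foldl_add]
      constructor
      · rintro (⟨hx | ⟨j, hj, rfl⟩⟩ | ⟨w', hw', j, hj, rfl⟩)
        · exact Or.inl hx
        · exact Or.inr ⟨w, by simp, j, hj, rfl⟩
        · exact Or.inr ⟨w', List.mem_cons_of_mem _ hw', j, hj, rfl⟩
      · rintro (hx | ⟨w', hw', j, hj, rfl⟩)
        · exact Or.inl (Or.inl hx)
        · rcases List.mem_cons.mp hw' with rfl | hw'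
          · exact Or.inl (Or.inr ⟨j, hj, rfl⟩)
          · exact Or.inr ⟨w', hw', j, hj, rfl⟩

lemma contains_pw_eq (words : List String) : ∀ x,
    PySem.Set.contains
      ((PySem.Set.ofList words).foldl (fun pw word =>
        (parts_of_string word).foldl (fun pw part => PySem.Set.add pw part) pw) PySem.Set.empty) x
    = PySem.Set.contains (prefixesB (PySem.Set.ofList words)) x := by
  intro x
  apply Bool.coe_iff_coe.mp
  rw [PySem.Set.contains_iff, PySem.Set.contains_iff]
  have hA := mem_nested_add (fun _ (j : String) => j) (fun w => parts_of_string w)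
    (PySem.Set.ofList words) PySem.Set.empty x
  have hB := mem_nested_add (fun w (j : Int) => PySem.Str.slice w none (some j))
    (fun w => PySem.List.pyRange 1 (PySem.Str.len w + 1) 1)
    (PySem.Set.ofList words) PySem.Set.empty x
  rw [show (prefixesB (PySem.Set.ofList words)) = ((PySem.Set.ofList words).foldl
    (fun pre w => (PySem.List.pyRange 1 (PySem.Str.len w + 1) 1).foldl
      (fun pre j => PySem.Set.add pre (PySem.Str.slice w none (some j))) pre)
    PySem.Set.empty) from rfl]
  rw [hA, hB]
  have hparts : ∀ (w : String), x ∈ parts_of_string w ↔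
      ∃ j ∈ PySem.List.pyRange 1 (PySem.Str.len w + 1) 1,
        x = PySem.Str.slice w none (some j) := by
    intro w
    rw [parts_of_string]
    rw [PySem.Set.mem_foldl_add]
    simp only [PySem.Set.empty, List.not_mem_nil, false_or]
    constructor
    · rintro ⟨j, hj, rfl⟩
      exact ⟨j, hj, by simp [PySem.Str.slice]⟩
    · rintro ⟨j, hj, rfl⟩
      exact ⟨j, hj, by simp [PySem.Str.slice]⟩
  constructor
  · rintro (h | ⟨w, hw, j0, hj0, rfl⟩)
    · simp [PySem.Set.empty] at h
    · obtain ⟨j', hj', hx⟩ := (hparts w).mp hj0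
      exact Or.inr ⟨w, hw, j', hj', hx⟩
  · rintro (h | ⟨w, hw, j, hj, rfl⟩)
    · simp [PySem.Set.empty] at h
    · exact Or.inr ⟨w, hw, PySem.Str.slice w none (some j),
        (hparts w).mpr ⟨j, hj, rfl⟩, rfl⟩

-- the descending level loop
lemma pyDescend_succ (k : Nat) : pyDescend (k + 1) = (k + 1) :: pyDescend k := by
  simp [pyDescend, List.range_succ]

lemma fold_desc_inv {σ : Type} (P : Nat → σ → Prop) (step : σ → Nat → σ) (cap : Nat)
    (hstep : ∀ n, 1 ≤ n → n ≤ cap → ∀ st, P n st → P (n - 1) (step st n)) :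
    ∀ k, k ≤ cap → ∀ st, P k st → P 0 ((pyDescend k).foldl step st) := by
  intro k
  induction k with
  | zero => intro _ st h; simpa [pyDescend] using h
  | succ m ih =>
      intro hk st h
      rw [pyDescend_succ]
      simp only [List.foldl_cons]
      exact ih (by omega) _ (by simpa using hstep (m + 1) (by omega) hk st h)

-- the invariant carried through A's level loop
def InvA (C : List (String × Nat)) (n : Nat) (st : Int × PySem.Set String) : Prop :=
  st.2.Nodup ∧ (∀ w, w ∈ st.2 ↔ ∃ dd, (w, dd) ∈ C ∧ n < dd) ∧
  st.1 = (st.2.map (fun w => ((mxC C w : Int)) * ((mxC C w : Int)))).sum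

-- ===== VERDICT (by name: the statement is the Claim_ definition above) =====
theorem get_score1_spec : Claim_equal_get_score1 := by
  unfold Claim_equal_get_score1 Spec_get_score1
  intro board words _ _
  -- abbreviations
  set ws : PySem.Set String := PySem.Set.ofList words with hws
  set pwA : PySem.Set String := ws.foldl (fun pw word =>
    (parts_of_string word).foldl (fun pw part => PySem.Set.add pw part) pw) PySem.Set.empty
    with hpwA
  set pwB : PySem.Set String := prefixesB ws with hpwB
  set C : List (String × Nat) := CC board pwB ws with hC
  set cap : Nat := board.length * board.length with hcap
  have hpw : ∀ x, PySem.Set.contains pwA x = PySem.Set.contains pwB x := contains_pw_eq words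
  -- bounds on the completion list
  have hCb : ∀ p ∈ C, 1 ≤ p.2 ∧ p.2 ≤ cap := by
    intro p hp
    rw [hC, CC] at hp
    rcases List.mem_flatMap.mp hp with ⟨r, hr, hp2⟩
    rcases List.mem_flatMap.mp hp2 with ⟨c, hc, hp3⟩
    have hrows : 1 ≤ board.length := by
      have := List.mem_range.mp hr; omega
    have hcap1 : 1 ≤ cap := by
      rw [hcap]; exact Nat.one_le_iff_ne_zero.mpr (by positivity)
    have := gen_bound board pwB ws (board.length * board.length - 1) _ _ _ _ _ p.1 p.2
      (by simpa using hp3)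
    omega
  -- level-n words of A are exactly the depth-n completions
  have hmem : ∀ n, 1 ≤ n → n ≤ cap → ∀ w, w ∈ LA board pwA ws n ↔ (w, n) ∈ C := by
    intro n h1 h2 w
    rw [LA, hC, CC]
    simp only [List.mem_flatMap, List.mem_map, List.mem_filter]
    constructor
    · rintro ⟨r, hr, c, hc, ⟨p1, p2⟩, ⟨hpg, hpn⟩, rfl⟩
      have hn : p2 = n := by simpa using hpn
      refine ⟨r, hr, c, hc, ?_⟩
      rw [gen_congr_pw board pwA pwB ws hpw] at hpg
      have hres := (gen_fuel_iff board pwB ws (n - 1) (board.length * board.length - 1)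
        _ _ _ _ _ p1 n (by omega) (by omega)).mp (hn ▸ hpg)
      simpa using hres
    · rintro ⟨r, hr, c, hc, hg⟩
      have hg' : (w, n) ∈ gen board pwB ws (n - 1)
          (PySem.Set.add PySem.Set.empty ((r : Int), (c : Int))) (r : Int) (c : Int) "" 1 :=
        (gen_fuel_iff board pwB ws (n - 1) (board.length * board.length - 1) _ _ _ _ _
          w n (by omega) (by omega)).mpr hg
      rw [← gen_congr_pw board pwA pwB ws hpw] at hg'
      exact ⟨r, hr, c, hc, (w, n), ⟨hg', by simp⟩, rfl⟩
  -- the step preserves the invariant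
  have hstep : ∀ n, 1 ≤ n → n ≤ cap → ∀ st, InvA C n st → InvA C (n - 1)
      ((fun (st : Int × PySem.Set String) (n : Nat) =>
        let r := get_score_in_n_size_at_board1 n board ws pwA st.2
        (st.1 + r.1, r.2)) st n) := by
    rintro n h1 h2 ⟨s, t⟩ ⟨hnd, hm, hs⟩
    dsimp only at hnd hm hs ⊢
    rw [levelA_eq_dsum board pwA ws n h1 t]
    obtain ⟨Δ, hdeq, hΔnd, hΔ1, hΔ2⟩ := dsum_spec ((n : Int) ^ 2) (LA board pwA ws n) 0 t hnd
    rw [hdeq]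
    have hΔC : ∀ w ∈ Δ, (w, n) ∈ C := fun w hw => (hmem n h1 h2 w).mp (hΔ1 w hw).1
    have hΔmx : ∀ w ∈ Δ, mxC C w = n := by
      intro w hw
      have hge : n ≤ mxC C w := le_mx w n C 0 (hΔC w hw)
      have hnotT : w ∉ t := (hΔ1 w hw).2
      have hle : mxC C w ≤ n := by
        refine mx_le w n C 0 ?_ (Nat.zero_le n)
        intro dd hdd
        by_contra hlt
        exact hnotT ((hm w).mpr ⟨dd, hdd, by omega⟩)
      omega
    refine ⟨?_, ?_, ?_⟩
    · dsimp only
      rw [List.nodup_append]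
      exact ⟨hnd, hΔnd, by
        intro a ha b hb hab
        exact (hΔ1 b hb).2 (hab ▸ ha)⟩
    · intro w
      dsimp only
      rw [List.mem_append]
      constructor
      · rintro (hw | hw)
        · obtain ⟨dd, hdd, hgt⟩ := (hm w).mp hw
          exact ⟨dd, hdd, by omega⟩
        · exact ⟨n, hΔC w hw, by omega⟩
      · rintro ⟨dd, hdd, hgt⟩
        by_cases hddn : n < dd
        · exact Or.inl ((hm w).mpr ⟨dd, hdd, hddn⟩)
        · have : dd = n := by omega
          subst this
          by_cases hwt : w ∈ t
          · exact Or.inl hwt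
          · exact Or.inr (hΔ2 w ((hmem dd h1 h2 w).mpr hdd) hwt)
    · dsimp only
      rw [List.map_append, List.sum_append, hs]
      have : Δ.map (fun w => ((mxC C w : Int)) * ((mxC C w : Int)))
          = Δ.map (fun _ => ((n : Int)) * ((n : Int))) := by
        refine List.map_congr_left ?_
        intro w hw
        rw [hΔmx w hw]
      rw [this]
      rw [show (Δ.map (fun _ => ((n : Int)) * ((n : Int)))).sum
          = ((n : Int) * (n : Int)) * (Δ.length : Int) from by
        simp [mul_comm]]
      ring
  -- run A's level loop
  have hinit : InvA C cap (0, PySem.Set.empty) := by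
    refine ⟨List.nodup_nil, ?_, rfl⟩
    intro w
    simp only [PySem.Set.empty, List.not_mem_nil, false_iff]
    rintro ⟨dd, hdd, hgt⟩
    exact absurd (hCb _ hdd).2 (by omega)
  have hfin := fold_desc_inv (InvA C)
    (fun (st : Int × PySem.Set String) (n : Nat) =>
      let r := get_score_in_n_size_at_board1 n board ws pwA st.2
      (st.1 + r.1, r.2)) cap hstep cap le_rfl (0, PySem.Set.empty) hinit
  obtain ⟨hfnd, hfm, hfs⟩ := hfin
  -- identify A's result
  have hA : get_score1 board words
      = (((pyDescend cap).foldl (fun (st : Int × PySem.Set String) (n : Nat) =>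
          let r := get_score_in_n_size_at_board1 n board ws pwA st.2
          (st.1 + r.1, r.2)) (0, PySem.Set.empty)).1) := by
    simp only [get_score1]
    have : board.length ^ 2 = cap := by rw [hcap, pow_two]
    rw [this]
  -- identify B's result
  have hB := altB_eq board words
  -- dictionary facts
  have hkeys : (C.foldl updB PySem.Dict.empty).keys = PySem.Set.ofList (C.map Prod.fst) := by
    have := PySem.Dict.keys_foldl_insert_key C Prod.fst
      (fun (d : PySem.Dict String Int) (x : String × Nat) => max ((x.2 : Int)) (d.getD x.1 0))
      PySem.Dict.empty
    rw [show (C.foldl (fun d x => d.insert x.1 (max ((x.2 : Int)) (d.getD x.1 0)))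
        PySem.Dict.empty) = C.foldl updB PySem.Dict.empty from rfl] at this
    rw [this]
    simp [PySem.Set.update_nil_left]
  have hknd : (C.foldl updB PySem.Dict.empty).keys.Nodup := by
    rw [hkeys]; exact PySem.Set.nodup_ofList _
  have hgetD : ∀ w, (C.foldl updB PySem.Dict.empty).getD w 0 = ((mxC C w : Nat) : Int) := by
    intro w
    rw [getD_foldl_updB w C PySem.Dict.empty]
    rw [PySem.Dict.getD_empty]
    rw [show (0 : Int) = ((0 : Nat) : Int) from rfl]
    rw [foldl_max_cast w C 0]
    rfl
  have hvals : (PySem.Dict.values (C.foldl updB PySem.Dict.empty))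
      = (C.foldl updB PySem.Dict.empty).keys.map
          (fun k => (C.foldl updB PySem.Dict.empty).getD k 0) :=
    PySem.Dict.values_eq_map_keys _ hknd 0
  -- compare the two sums
  rw [hA, hB, hvals, hkeys]
  rw [List.map_map]
  have hperm : (((pyDescend cap).foldl (fun (st : Int × PySem.Set String) (n : Nat) =>
      let r := get_score_in_n_size_at_board1 n board ws pwA st.2
      (st.1 + r.1, r.2)) (0, PySem.Set.empty)).2).Perm
        (PySem.Set.ofList (C.map Prod.fst)) := by
    rw [List.perm_ext_iff_of_nodup hfnd (PySem.Set.nodup_ofList _)]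
    intro w
    rw [hfm w, PySem.Set.mem_ofList]
    constructor
    · rintro ⟨dd, hdd, _⟩
      exact List.mem_map.mpr ⟨(w, dd), hdd, rfl⟩
    · intro hw
      rcases List.mem_map.mp hw with ⟨p, hp, rfl⟩
      exact ⟨p.2, by simpa using hp, (hCb p hp).1⟩
  rw [hfs]
  have := (hperm.map (fun w => ((mxC C w : Int)) * ((mxC C w : Int)))).sum_eq
  rw [this]
  refine congrArg List.sum ?_
  refine List.map_congr_left ?_
  intro w _
  rw [Function.comp, hgetD w]
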